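-- pv_equiv track=rewrite | github.com/prasilla487/Python_excersizes_DSA | arrays/string_ignorance.py | ignorance
-- ===== SOURCE A (Python) =====
-- def ignorance(ar):
--     seen = []
--     new = ""
--     for let in ar:
--         let = let.lower()
--         if let in seen:
--             seen.remove(let)
--             continue
--         else:
--             new += let
--             seen.append(let)
--     return new
-- ===== SOURCE B (Python) =====
-- def ignorance(ar):
--     low = [c.lower() for c in ar]
--     return "".join(c for i, c in enumerate(low) if low[:i].count(c) % 2 == 0)
-- ===== Notes on version B (the rewrite author's own statement) =====
-- stated objective: simpler
-- what changed: Replaces the stateful toggle scan (mutable seen list with remove/append) by a stateless prefix-parity comprehension: lowercase once, keep position i iff its char occurred an even number of times before i.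
import Mathlib
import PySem

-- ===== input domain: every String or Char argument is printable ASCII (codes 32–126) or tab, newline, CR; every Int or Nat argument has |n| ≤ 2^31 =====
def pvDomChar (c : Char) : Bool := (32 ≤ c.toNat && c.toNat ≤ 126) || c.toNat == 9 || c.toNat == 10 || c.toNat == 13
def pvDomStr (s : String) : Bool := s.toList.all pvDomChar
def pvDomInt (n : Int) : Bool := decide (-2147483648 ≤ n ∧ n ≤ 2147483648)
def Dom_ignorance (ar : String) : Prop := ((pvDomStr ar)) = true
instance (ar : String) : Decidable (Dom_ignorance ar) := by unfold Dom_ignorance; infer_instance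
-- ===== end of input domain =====

-- B replaces A's stateful toggle scan by a stateless prefix-parity comprehension (objective: simpler).

-- ===== PORT A =====
-- literal transliteration of A's single loop: state (seen, new), toggle on duplicate
def ignorance (ar : String) : String :=
  let st := ar.toList.foldl
    (fun (st : List Char × List Char) letc =>
      let c := PySem.Chars.lowerChar letc
      if c ∈ st.1 then (st.1.erase c, st.2)
      else (st.1 ++ [c], st.2 ++ [c]))
    ([], [])
  String.mk st.2

-- ===== PORT B =====
-- literal transliteration of Source B: lowercase once, keep index i iff low[:i].count(low[i]) is even
def ignorance_alt (ar : String) : String :=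
  let low := ar.toList.map PySem.Chars.lowerChar
  String.mk (((PySem.List.enumerate low).filter
    (fun p => (PySem.List.slice low none (some p.1)).count p.2 % 2 == 0)).map (·.2))

-- ===== PRECONDITION & SPEC =====
def Spec_ignorance (ar : String) (out : String) : Prop := out = ignorance_alt ar
instance (ar : String) (out : String) : Decidable (Spec_ignorance ar out) := by unfold Spec_ignorance; infer_instance

-- ===== CLAIM (what is proved, stated in full; the proofs are below) =====
def Claim_equal_ignorance : Prop := ∀ (ar : String), Dom_ignorance ar → Spec_ignorance ar (ignorance ar)

-- ===== LEMMAS AND PROOFS =====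

-- reference function: output of processing suffix L after already-lowered prefix P
def pvKeep : List Char → List Char → List Char
  | _, [] => []
  | P, c :: L => (if P.count c % 2 = 0 then [c] else []) ++ pvKeep (P ++ [c]) L

-- A's fold, relative to an invariant-carrying state
theorem pvFoldA (L : List Char) : ∀ (P s n : List Char), s.Nodup →
    (∀ d, d ∈ s ↔ P.count d % 2 = 1) →
    (L.foldl (fun (st : List Char × List Char) c =>
       if c ∈ st.1 then (st.1.erase c, st.2)
       else (st.1 ++ [c], st.2 ++ [c])) (s, n)).2 = n ++ pvKeep P L := by
  induction L with
  | nil => intro P s n _ _; simp [pvKeep]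
  | cons c L ih =>
    intro P s n hnd hmem
    simp only [List.foldl_cons, pvKeep]
    by_cases hc : c ∈ s
    · have hodd : P.count c % 2 = 1 := (hmem c).mp hc
      rw [if_pos hc, if_neg (by omega)]
      simp only [List.nil_append]
      exact ih (P ++ [c]) (s.erase c) n (hnd.erase c) (by
        intro d
        rw [hnd.mem_erase_iff, hmem d, List.count_append, List.count_singleton]
        by_cases hd : d = c
        · subst hd; simp [hodd]; omega
        · simp [hd, Ne.symm hd, beq_iff_eq])
    · have heven : P.count c % 2 ≠ 1 := fun h => hc ((hmem c).mpr h)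
      rw [if_neg hc, if_pos (by omega)]
      rw [ih (P ++ [c]) (s ++ [c]) (n ++ [c])
        (by
          simp [List.nodup_append, hnd]
          intro a ha h
          exact hc (h ▸ ha))
        (by
          intro d
          rw [List.mem_append, hmem d, List.count_append, List.count_singleton,
            List.mem_singleton]
          by_cases hd : d = c
          · subst hd; simp; omega
          · simp [hd, Ne.symm hd, beq_iff_eq])]
      simp

-- B's filter over enumerate, relative to the processed prefix P
theorem pvFilterB (L : List Char) : ∀ (P : List Char),
    (((PySem.List.enumerate L (P.length : Int)).filter
       (fun p => (PySem.List.slice (P ++ L) none (some p.1)).count p.2 % 2 == 0)).map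
       (·.2)) = pvKeep P L := by
  induction L with
  | nil => intro P; simp [PySem.List.enumerate_nil, pvKeep]
  | cons c L ih =>
    intro P
    rw [PySem.List.enumerate_cons]
    simp only [List.filter_cons, pvKeep]
    have hsl : PySem.List.slice (P ++ c :: L) none (some ((P.length : Nat) : Int))
        = P := by
      rw [PySem.List.slice_to_natCast]
      simp
    have harr : P ++ c :: L = (P ++ [c]) ++ L := by simp
    have hstep : ((P.length : Int) + 1) = (((P ++ [c]).length : Nat) : Int) := by
      simp
    by_cases h : P.count c % 2 = 0
    · simp only [hsl, h, beq_self_eq_true, if_true, List.map_cons]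
      rw [harr, hstep, ih (P ++ [c])]
      simp
    · simp only [hsl, if_neg h]
      rw [if_neg (by simpa using h)]
      rw [harr, hstep, ih (P ++ [c])]
      simp

-- A's loop lowers each element as it goes; this is folding the plain step over the lowered list
theorem pvFoldLower : ∀ (l : List Char) (init : List Char × List Char),
    l.foldl (fun (st : List Char × List Char) letc =>
        let c := PySem.Chars.lowerChar letc
        if c ∈ st.1 then (st.1.erase c, st.2)
        else (st.1 ++ [c], st.2 ++ [c])) init
    = (l.map PySem.Chars.lowerChar).foldl (fun (st : List Char × List Char) c =>
        if c ∈ st.1 then (st.1.erase c, st.2)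
        else (st.1 ++ [c], st.2 ++ [c])) init := by
  intro l
  induction l with
  | nil => intro init; rfl
  | cons x l ih => intro init; simp only [List.foldl_cons, List.map_cons, ih]

-- ===== VERDICT (by name: the statement is the Claim_ definition above) =====
theorem ignorance_spec : Claim_equal_ignorance := by
  intro ar _
  show ignorance ar = ignorance_alt ar
  unfold ignorance ignorance_alt
  rw [pvFoldLower]
  have hA := pvFoldA (ar.toList.map PySem.Chars.lowerChar) [] [] []
    List.nodup_nil (by simp)
  have hB := pvFilterB (ar.toList.map PySem.Chars.lowerChar) []
  simp only [List.length_nil, Nat.cast_zero, List.nil_append] at hA hB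
  simp only [hA, hB]
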